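-- pv_equiv track=rewrite | github.com/nastyh/LeetCode | Basic Data Structures/2140_solving_questions_with_brainpower.py | mostPoints_from_left
-- ===== SOURCE A (Python) =====
-- from typing import List
--
-- def mostPoints_from_left(questions: List[List[int]]) -> int:
--     """
--     same but from left to right
--     skip: dp[i+1]=max(dp[i+1],dp[i])
--     solve: dp[j]=max(dp[j],dp[i]+points[i]), j is i + brainpower[i] + 1
--     """
--     n = len(questions)
--     dp = [0] * (n + 1)
--
--     # Process each question from left to right.
--     for i in range(n):
--         points, brainpower = questions[i]
--
--         # Option 1: Skip the question.
--         dp[i + 1] = max(dp[i + 1], dp[i])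
--
--         # Option 2: Solve the question.
--         next_index = i + brainpower + 1
--         if next_index <= n:
--             dp[next_index] = max(dp[next_index], dp[i] + points)
--         else:
--             dp[n] = max(dp[n], dp[i] + points)
--
--     return dp[n]
-- ===== SOURCE B (Python) =====
-- from typing import List
--
-- def mostPoints_from_left(questions: List[List[int]]) -> int:
--     # Backward (pull) DP: dp[i] = best score from question i onward.
--     n = len(questions)
--     dp = [0] * (n + 1)
--     for i in range(n - 1, -1, -1):
--         points, brainpower = questions[i]
--         jump = min(i + brainpower + 1, n)
--         dp[i] = max(dp[i + 1], points + dp[jump])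
--     return dp[0]
-- ===== Notes on version B (the rewrite author's own statement) =====
-- stated objective: alternative
-- what changed: Replaces the forward push DP (each question updates two future checkpoints, answer read at dp[n]) by a backward pull DP (dp[i] computed once as max of skip/solve from already-final dp[i+1] and dp[min(i+brainpower+1,n)], answer at dp[0]).
-- outside the precondition, e.g. on mostPoints_from_left([[5, -1]]): A returns 0, B returns 5
import Mathlib
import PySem

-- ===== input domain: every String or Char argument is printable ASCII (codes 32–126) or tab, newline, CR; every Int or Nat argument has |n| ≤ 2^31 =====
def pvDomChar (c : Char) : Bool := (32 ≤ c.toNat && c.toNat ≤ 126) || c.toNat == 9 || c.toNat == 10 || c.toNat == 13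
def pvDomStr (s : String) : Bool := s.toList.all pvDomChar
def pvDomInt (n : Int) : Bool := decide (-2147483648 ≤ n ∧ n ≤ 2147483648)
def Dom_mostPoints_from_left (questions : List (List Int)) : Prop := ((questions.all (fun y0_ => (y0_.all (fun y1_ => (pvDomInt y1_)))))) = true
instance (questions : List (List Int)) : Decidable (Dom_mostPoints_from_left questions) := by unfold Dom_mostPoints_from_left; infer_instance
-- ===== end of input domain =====

-- B replaces A's forward push DP by a backward pull DP over the same recurrence; alternative decomposition, same O(n) cost.


-- ===== PORT A =====
-- one iteration of A's forward loop body (reads/writes the dp array exactly as A does)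
def stepA (qs : List (List Int)) (n : Nat) (dp : List Int) (i : Nat) : List Int :=
  let q := qs.getD i []
  let points := q.getD 0 0
  let brainpower := q.getD 1 0
  let dp1 := dp.set (i+1) (max (dp.getD (i+1) 0) (dp.getD i 0))
  let next : Int := (i : Int) + brainpower + 1
  if next ≤ (n : Int) then
    dp1.set next.toNat (max (dp1.getD next.toNat 0) (dp1.getD i 0 + points))
  else
    dp1.set n (max (dp1.getD n 0) (dp1.getD i 0 + points))

def mostPoints_from_left (questions : List (List Int)) : Int :=
  let n := questions.length
  ((List.range n).foldl (stepA questions n) (List.replicate (n+1) 0)).getD n 0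

-- ===== PORT B =====
-- B's backward loop: dpFromB qs n k is the dp suffix [dp[n-k], …, dp[n]] after k backward iterations
def dpFromB (qs : List (List Int)) (n : Nat) : Nat → List Int
  | 0 => [0]
  | k+1 =>
    let rest := dpFromB qs n k
    let i := n - (k+1)
    let q := qs.getD i []
    let points := q.getD 0 0
    let brainpower := q.getD 1 0
    let jump : Int := min ((i : Int) + brainpower + 1) (n : Int)
    (max (rest.getD 0 0) (points + rest.getD (jump.toNat - (i+1)) 0)) :: rest

def mostPoints_from_left_alt (questions : List (List Int)) : Int :=
  let n := questions.length
  (dpFromB questions n n).getD 0 0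

-- ===== PRECONDITION & SPEC =====
-- Pre_ restricts to the problem's natural domain: every question is a pair [points, brainpower]
-- with brainpower ≥ 0; rows of other lengths make A raise (unpacking), and negative brainpower
-- makes A either raise IndexError or write through Python's negative-index wraparound.
def Pre_mostPoints_from_left (questions : List (List Int)) : Prop :=
  ∀ q ∈ questions, q.length = 2 ∧ 0 ≤ q.getD 1 0
instance (questions : List (List Int)) : Decidable (Pre_mostPoints_from_left questions) := by
  unfold Pre_mostPoints_from_left; infer_instance

def pvWitness_mostPoints_from_left : List (List Int) := [[3, 2], [4, 3], [4, 4], [2, 5]]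

def Spec_mostPoints_from_left (questions : List (List Int)) (out : Int) : Prop := out = mostPoints_from_left_alt questions
instance (questions : List (List Int)) (out : Int) : Decidable (Spec_mostPoints_from_left questions out) := by unfold Spec_mostPoints_from_left; infer_instance

-- ===== CLAIM (what is proved, stated in full; the proofs are below) =====
def Claim_equal_mostPoints_from_left : Prop := ∀ (questions : List (List Int)), Dom_mostPoints_from_left questions → Pre_mostPoints_from_left questions → Spec_mostPoints_from_left questions (mostPoints_from_left questions)

-- ===== LEMMAS AND PROOFS =====

-- value of B's dp at absolute index j (the spec both sides are related to)
def Fv (qs : List (List Int)) (j : Nat) : Int :=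
  (dpFromB qs qs.length (qs.length - j)).getD 0 0

-- max over j ∈ [i, i+k] of dp[j] + Fv j
def maxDF (dp : List Int) (Fvv : Nat → Int) : Nat → Nat → Int
  | i, 0 => dp.getD i 0 + Fvv i
  | i, k+1 => max (dp.getD i 0 + Fvv i) (maxDF dp Fvv (i+1) k)

theorem getD_set_eq (l : List Int) (m : Nat) (x : Int) (h : m < l.length) :
    (l.set m x).getD m 0 = x := by
  rw [List.getD_eq_getElem?_getD, List.getElem?_set_self (by omega)]; rfl

theorem getD_set_ne (l : List Int) (m j : Nat) (x : Int) (h : m ≠ j) :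
    (l.set m x).getD j 0 = l.getD j 0 := by
  rw [List.getD_eq_getElem?_getD, List.getElem?_set_ne h, List.getD_eq_getElem?_getD]

theorem maxDF_set_out (dp : List Int) (Fvv : Nat → Int) (m : Nat) (x : Int) :
    ∀ k i, (m < i ∨ i + k < m) → maxDF (dp.set m x) Fvv i k = maxDF dp Fvv i k := by
  intro k
  induction k with
  | zero => intro i h; show _ + _ = _ + _; rw [getD_set_ne dp m i x (by omega)]
  | succ k ih =>
    intro i h
    show max _ _ = max _ _
    rw [getD_set_ne dp m i x (by omega), ih (i+1) (by omega)]

theorem maxDF_bump (dp : List Int) (Fvv : Nat → Int) (m : Nat) (v : Int) :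
    ∀ k i, i ≤ m → m ≤ i + k → m < dp.length →
    maxDF (dp.set m (max (dp.getD m 0) v)) Fvv i k = max (maxDF dp Fvv i k) (v + Fvv m) := by
  intro k
  induction k with
  | zero =>
    intro i h1 h2 h3
    have hm : m = i := by omega
    subst hm
    show _ + _ = max (_ + _) _
    rw [getD_set_eq dp m _ h3, ← max_add_add_right]
  | succ k ih =>
    intro i h1 h2 h3
    by_cases hm : m = i
    · subst hm
      show max _ _ = max (max _ _) _
      rw [getD_set_eq dp m _ h3,
        maxDF_set_out dp Fvv m _ k (m+1) (by omega), ← max_add_add_right]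
      rw [max_right_comm]
    · show max _ _ = max (max _ _) _
      rw [getD_set_ne dp m i _ (by omega),
        ih (i+1) (by omega) (by omega) h3, ← max_assoc]

theorem dpFromB_suffix (qs : List (List Int)) (n : Nat) :
    ∀ k j, j ≤ k → (dpFromB qs n k).getD j 0 = (dpFromB qs n (k - j)).getD 0 0 := by
  intro k
  induction k with
  | zero => intro j h; interval_cases j; rfl
  | succ k ih =>
    intro j h
    cases j with
    | zero => rfl
    | succ j =>
      show (_ :: dpFromB qs n k).getD (j+1) 0 = _
      rw [List.getD_cons_succ, ih j (by omega)]
      have h2 : k + 1 - (j + 1) = k - j := by omega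
      rw [h2]

theorem Fv_last (qs : List (List Int)) : Fv qs qs.length = 0 := by
  unfold Fv
  rw [Nat.sub_self]
  rfl

-- the clamped jump target of question i, as a Nat
def jmpN (qs : List (List Int)) (n i : Nat) : Nat :=
  (min ((i : Int) + (qs.getD i []).getD 1 0 + 1) (n : Int)).toNat

theorem jmpN_ge (qs : List (List Int)) (n i : Nat) (hi : i < n)
    (hb : 0 ≤ (qs.getD i []).getD 1 0) : i + 1 ≤ jmpN qs n i := by
  unfold jmpN; omega

theorem jmpN_le (qs : List (List Int)) (n i : Nat) (hi : i < n) :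
    jmpN qs n i ≤ n := by
  unfold jmpN; omega

theorem Fv_rec (qs : List (List Int)) (i : Nat) (hi : i < qs.length)
    (hb : 0 ≤ (qs.getD i []).getD 1 0) :
    Fv qs i = max (Fv qs (i+1))
      ((qs.getD i []).getD 0 0 + Fv qs (jmpN qs qs.length i)) := by
  set n := qs.length with hn
  have hk : n - i = (n - (i+1)) + 1 := by omega
  have hji : jmpN qs n i ≥ i + 1 := jmpN_ge qs n i hi hb
  have hjn : jmpN qs n i ≤ n := jmpN_le qs n i hi
  rw [Fv, hk]
  simp only [dpFromB]
  have hidx : n - ((n - (i+1)) + 1) = i := by omega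
  rw [hidx, List.getD_cons_zero]
  have hjt : (min ((i : Int) + (qs.getD i []).getD 1 0 + 1) (n : Int)).toNat = jmpN qs n i := rfl
  rw [hjt, dpFromB_suffix qs n (n - (i+1)) (jmpN qs n i - (i+1)) (by omega)]
  have h2 : n - (i+1) - (jmpN qs n i - (i+1)) = n - jmpN qs n i := by omega
  rw [h2]
  rfl

theorem Fv_antitone (qs : List (List Int)) (i : Nat) (hi : i < qs.length)
    (hb : 0 ≤ (qs.getD i []).getD 1 0) : Fv qs (i+1) ≤ Fv qs i := by
  rw [Fv_rec qs i hi hb]; exact le_max_left _ _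

theorem pre_at (qs : List (List Int)) (hP : Pre_mostPoints_from_left qs) (i : Nat)
    (hi : i < qs.length) : (qs.getD i []).length = 2 ∧ 0 ≤ (qs.getD i []).getD 1 0 := by
  have hmem : qs.getD i [] ∈ qs := by
    rw [List.getD_eq_getElem?_getD, List.getElem?_eq_getElem hi]
    exact List.getElem_mem hi
  exact hP _ hmem

-- A's loop, started at iteration i on array dp, computes the pull-DP maximum
theorem invA (qs : List (List Int)) (hP : Pre_mostPoints_from_left qs) :
    ∀ k i (dp : List Int), i + k = qs.length → dp.length = qs.length + 1 →
    ((List.range' i k).foldl (stepA qs qs.length) dp).getD qs.length 0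
      = maxDF dp (Fv qs) i k := by
  set n := qs.length with hn
  intro k
  induction k with
  | zero =>
    intro i dp hik hlen
    have hi : i = n := by omega
    subst hi
    show dp.getD n 0 = dp.getD n 0 + Fv qs n
    rw [hn, Fv_last, add_zero]
  | succ k ih =>
    intro i dp hik hlen
    have hi : i < n := by omega
    obtain ⟨hq2, hb⟩ := pre_at qs hP i hi
    rw [List.range'_succ, List.foldl_cons]
    have hstep : stepA qs n dp i =
        (dp.set (i+1) (max (dp.getD (i+1) 0) (dp.getD i 0))).set (jmpN qs n i)
          (max ((dp.set (i+1) (max (dp.getD (i+1) 0) (dp.getD i 0))).getD (jmpN qs n i) 0)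
               (dp.getD i 0 + (qs.getD i []).getD 0 0)) := by
      unfold stepA
      simp only
      set d1 := dp.set (i+1) (max (dp.getD (i+1) 0) (dp.getD i 0)) with hd1
      have hdi : d1.getD i 0 = dp.getD i 0 := getD_set_ne dp (i+1) i _ (by omega)
      by_cases hle : (i : Int) + (qs.getD i []).getD 1 0 + 1 ≤ (n : Int)
      · rw [if_pos hle]
        have : ((i : Int) + (qs.getD i []).getD 1 0 + 1).toNat = jmpN qs n i := by
          unfold jmpN; omega
        rw [this, hdi]
      · rw [if_neg hle]
        have : jmpN qs n i = n := by unfold jmpN; omega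
        rw [this, hdi]
    rw [hstep, ih (i+1) _ (by omega) (by simp [hlen])]
    have hlen1 : (dp.set (i+1) (max (dp.getD (i+1) 0) (dp.getD i 0))).length = n + 1 := by
      simp [hlen]
    have hjg := jmpN_ge qs n i hi hb
    have hjl := jmpN_le qs n i hi
    rw [maxDF_bump _ (Fv qs) (jmpN qs n i) _ k (i+1) (by omega) (by omega) (by omega)]
    rw [maxDF_bump dp (Fv qs) (i+1) (dp.getD i 0) k (i+1) (le_refl _) (by omega) (by omega)]
    show _ = max (dp.getD i 0 + Fv qs i) (maxDF dp (Fv qs) (i+1) k)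
    rw [show Fv qs i = max (Fv qs (i+1))
          ((qs.getD i []).getD 0 0 + Fv qs (jmpN qs n i)) from Fv_rec qs i hi hb,
      ← max_add_add_left, ← add_assoc, max_assoc, max_comm]

theorem maxDF_zero (qs : List (List Int)) (hP : Pre_mostPoints_from_left qs) :
    ∀ k i, i + k = qs.length →
    maxDF (List.replicate (qs.length + 1) 0) (Fv qs) i k = Fv qs i := by
  set n := qs.length with hn
  intro k
  induction k with
  | zero =>
    intro i hik
    have : (List.replicate (n+1) (0:Int)).getD i 0 = 0 := by
      rw [List.getD_eq_getElem?_getD, List.getElem?_replicate]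
      simp [show i < n + 1 by omega]
    show _ + _ = _
    rw [this, zero_add]
  | succ k ih =>
    intro i hik
    have hi : i < n := by omega
    obtain ⟨_, hb⟩ := pre_at qs hP i hi
    have : (List.replicate (n+1) (0:Int)).getD i 0 = 0 := by
      rw [List.getD_eq_getElem?_getD, List.getElem?_replicate]
      simp [show i < n + 1 by omega]
    show max _ _ = _
    rw [ih (i+1) (by omega), this, zero_add]
    exact max_eq_left (Fv_antitone qs i hi hb)

-- ===== VERDICT (by name: the statement is the Claim_ definition above) =====
theorem mostPoints_from_left_spec : Claim_equal_mostPoints_from_left := by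
  intro qs _ hP
  show mostPoints_from_left qs = mostPoints_from_left_alt qs
  unfold mostPoints_from_left
  simp only
  rw [List.range_eq_range', invA qs hP qs.length 0 _ (by omega) (by simp),
    maxDF_zero qs hP qs.length 0 (by omega)]
  unfold Fv mostPoints_from_left_alt
  simp
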